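-- pv_equiv track=rewrite | github.com/RafyHany/8-Puzzle | 8-Puzzles/iterativeDFS.py | prepare_initial_state
-- ===== SOURCE A (Python) =====
-- def prepare_initial_state(initial_State: list[list[int]]) -> int:
--     k = 8
--     intial = 0
--     for i in range(3):
--         for j in range(3):
--             intial += initial_State[i][j] * (10 ** k)
--             k -= 1
--
--     return intial
-- ===== SOURCE B (Python) =====
-- def prepare_initial_state(initial_State: list[list[int]]) -> int:
--     (a, b, c, *_), (d, e, f, *_), (g, h, i, *_), *_ = initial_State
--     value = 0
--     for cell in (a, b, c, d, e, f, g, h, i):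
--         value = value * 10 + cell
--     return value
-- ===== Notes on version B (the rewrite author's own statement) =====
-- stated objective: simpler
-- what changed: Replaces A's index/exponent bookkeeping (k counter, 10**k weights, nested index lookups) by sequence-unpacking the nine leading cells and folding them with Horner's scheme value = value*10 + cell.
import Mathlib
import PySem

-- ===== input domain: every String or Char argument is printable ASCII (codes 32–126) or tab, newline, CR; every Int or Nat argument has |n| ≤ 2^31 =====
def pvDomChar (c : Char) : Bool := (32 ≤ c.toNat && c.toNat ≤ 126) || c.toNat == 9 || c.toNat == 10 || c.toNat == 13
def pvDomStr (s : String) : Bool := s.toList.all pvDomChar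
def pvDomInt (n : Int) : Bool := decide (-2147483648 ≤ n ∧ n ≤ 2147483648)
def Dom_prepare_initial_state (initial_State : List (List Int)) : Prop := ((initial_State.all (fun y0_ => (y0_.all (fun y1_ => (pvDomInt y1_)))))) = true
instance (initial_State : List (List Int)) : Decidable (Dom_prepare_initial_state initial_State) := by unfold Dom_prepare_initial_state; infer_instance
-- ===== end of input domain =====

-- B unpacks the nine leading cells by sequence destructuring and folds them with Horner's scheme (value = value*10 + cell), dropping A's k counter, 10**k weights and index lookups; objective: simpler.

-- ===== PORT A =====
-- literal port of A: k starts at 8, nested range(3) loops, intial += grid[i][j] * 10**k; k -= 1.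
-- pyGetD is used for the two index lookups; Pre_ guarantees both indices are in range.
def prepare_initial_state (initial_State : List (List Int)) : Int :=
  let st := (PySem.List.pyRange 0 3 1).foldl (fun (st : Int × Int) i =>
    (PySem.List.pyRange 0 3 1).foldl (fun (st : Int × Int) j =>
      (st.1 - 1,
       st.2 + PySem.List.pyGetD (PySem.List.pyGetD initial_State i []) j 0 * 10 ^ st.1.toNat)) st) (8, 0)
  st.2

-- ===== PORT B =====
-- sequence unpacking: the Python raises ValueError when the pattern does not match (outside Pre_);
-- the fallback 0 branch is unreachable under Pre_.
def prepare_initial_state_alt (initial_State : List (List Int)) : Int :=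
  match initial_State with
  | (a :: b :: c :: _) :: (d :: e :: f :: _) :: (g :: h :: i :: _) :: _ =>
      [a, b, c, d, e, f, g, h, i].foldl (fun value cell => value * 10 + cell) 0
  | _ => 0

-- ===== PRECONDITION & SPEC =====
-- Pre_ = exactly the inputs on which A returns (A raises IndexError when there are fewer than
-- 3 rows or one of the first 3 rows has fewer than 3 cells).
def Pre_prepare_initial_state (initial_State : List (List Int)) : Prop :=
  3 ≤ initial_State.length ∧ ∀ row ∈ initial_State.take 3, 3 ≤ row.length
instance (initial_State : List (List Int)) : Decidable (Pre_prepare_initial_state initial_State) := by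
  unfold Pre_prepare_initial_state; infer_instance
def pvWitness_prepare_initial_state : List (List Int) :=
  [[1, 2, 3], [4, 5, 6], [7, 8, 0]]
def Spec_prepare_initial_state (initial_State : List (List Int)) (out : Int) : Prop := out = prepare_initial_state_alt initial_State
instance (initial_State : List (List Int)) (out : Int) : Decidable (Spec_prepare_initial_state initial_State out) := by unfold Spec_prepare_initial_state; infer_instance

-- ===== CLAIM (what is proved, stated in full; the proofs are below) =====
def Claim_equal_prepare_initial_state : Prop := ∀ (initial_State : List (List Int)), Dom_prepare_initial_state initial_State → Pre_prepare_initial_state initial_State → Spec_prepare_initial_state initial_State (prepare_initial_state initial_State)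

-- ===== LEMMAS AND PROOFS =====
theorem pyGetD_one_cons {α : Type} (x y : α) (xs : List α) (d : α) :
    PySem.List.pyGetD (x :: y :: xs) 1 d = y := by
  rw [PySem.List.pyGetD_ofNat' (x :: y :: xs) 1 d]; simp

theorem pyGetD_two_cons {α : Type} (x y z : α) (xs : List α) (d : α) :
    PySem.List.pyGetD (x :: y :: z :: xs) 2 d = z := by
  rw [PySem.List.pyGetD_ofNat' (x :: y :: z :: xs) 2 d]; simp

-- ===== VERDICT (by name: the statement is the Claim_ definition above) =====
theorem prepare_initial_state_spec : Claim_equal_prepare_initial_state := by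
  intro xs _ pre
  obtain ⟨hlen, hrows⟩ := pre
  match xs, hlen with
  | r0 :: r1 :: r2 :: rest, _ =>
  have h0 := hrows r0 (by simp [List.take])
  have h1 := hrows r1 (by simp [List.take])
  have h2 := hrows r2 (by simp [List.take])
  obtain ⟨a0, b0, c0, t0, rfl⟩ : ∃ a b c t, r0 = a :: b :: c :: t := by
    match r0, h0 with | a :: b :: c :: t, _ => exact ⟨a, b, c, t, rfl⟩
  obtain ⟨a1, b1, c1, t1, rfl⟩ : ∃ a b c t, r1 = a :: b :: c :: t := by
    match r1, h1 with | a :: b :: c :: t, _ => exact ⟨a, b, c, t, rfl⟩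
  obtain ⟨a2, b2, c2, t2, rfl⟩ : ∃ a b c t, r2 = a :: b :: c :: t := by
    match r2, h2 with | a :: b :: c :: t, _ => exact ⟨a, b, c, t, rfl⟩
  have hr : PySem.List.pyRange 0 3 1 = [0, 1, 2] := by decide
  show prepare_initial_state _ = prepare_initial_state_alt _
  simp only [prepare_initial_state, prepare_initial_state_alt, hr,
    List.foldl_cons, List.foldl_nil,
    PySem.List.pyGetD_zero_cons, pyGetD_one_cons, pyGetD_two_cons]
  norm_num
  simp only [show Int.toNat 8 = 8 by decide, show Int.toNat 7 = 7 by decide,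
    show Int.toNat 6 = 6 by decide, show Int.toNat 5 = 5 by decide, show Int.toNat 4 = 4 by decide,
    show Int.toNat 3 = 3 by decide, show Int.toNat 2 = 2 by decide]
  norm_num
  ring
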